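-- pv_equiv track=rewrite | github.com/Egorrr1613/lambdaBrain | 28_task/5.py | find_max_ids_index
-- ===== SOURCE A (Python) =====
-- def find_max_ids_index(
--         max_index: int, iter_index: int, ids: list[int], ignore_index_list: list[int]
-- ):
--     if iter_index == len(ids):
--         return max_index
--     if (
--             (ids[max_index] <= ids[iter_index]) and (iter_index not in ignore_index_list)
--     ) or max_index in ignore_index_list:
--         max_index = iter_index
--     return find_max_ids_index(max_index, iter_index + 1, ids, ignore_index_list)
-- ===== SOURCE B (Python) =====
-- def find_max_ids_index(
--         max_index: int, iter_index: int, ids: list[int], ignore_index_list: list[int]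
-- ):
--     for j in range(iter_index, len(ids)):
--         if (
--                 (ids[max_index] <= ids[j]) and (j not in ignore_index_list)
--         ) or max_index in ignore_index_list:
--             max_index = j
--     return max_index
-- ===== Notes on version B (the rewrite author's own statement) =====
-- stated objective: idiomatic
-- what changed: Replaces the tail recursion with a single for-loop over range(iter_index, len(ids)) that folds the same comparison into an accumulator, so no call stack is consumed.
import Mathlib
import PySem

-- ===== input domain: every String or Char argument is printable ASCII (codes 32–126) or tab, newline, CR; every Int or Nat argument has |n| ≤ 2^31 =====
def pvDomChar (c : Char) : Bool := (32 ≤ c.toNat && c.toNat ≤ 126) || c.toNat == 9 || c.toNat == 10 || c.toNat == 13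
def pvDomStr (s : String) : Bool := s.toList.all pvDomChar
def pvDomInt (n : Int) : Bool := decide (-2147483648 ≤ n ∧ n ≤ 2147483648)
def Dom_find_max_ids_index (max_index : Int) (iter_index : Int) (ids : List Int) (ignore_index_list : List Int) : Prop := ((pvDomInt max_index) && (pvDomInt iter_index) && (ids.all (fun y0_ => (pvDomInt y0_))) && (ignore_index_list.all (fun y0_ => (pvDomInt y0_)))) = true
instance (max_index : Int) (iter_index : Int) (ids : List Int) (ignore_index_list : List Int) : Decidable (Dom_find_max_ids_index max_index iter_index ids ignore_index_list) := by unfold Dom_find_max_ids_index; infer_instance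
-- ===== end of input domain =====

-- B replaces A's tail recursion by a for-loop (a fold over range(iter_index, len(ids))) with the
-- identical branch condition; same return value wherever A returns, no call stack consumed.

-- ===== PORT A =====
-- literal transliteration of A's tail recursion; where Python raises IndexError
-- (an index outside [-len, len)) the port returns a junk value — excluded by Pre_.
def find_max_ids_index (max_index : Int) (iter_index : Int) (ids : List Int) (ignore_index_list : List Int) : Int :=
  if _h1 : iter_index = (ids.length : Int) then max_index
  else if _h2 : iter_index > (ids.length : Int) ∨ iter_index < -(ids.length : Int) then 0  -- Python raises IndexError / never terminates is impossible: out-of-range access raises here; excluded by Pre_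
  else
    let max_index' :=
      if ((PySem.List.pyGet? ids max_index).getD 0 ≤ (PySem.List.pyGet? ids iter_index).getD 0
            ∧ ¬ ignore_index_list.contains iter_index)
          ∨ ignore_index_list.contains max_index
      then iter_index else max_index
    find_max_ids_index max_index' (iter_index + 1) ids ignore_index_list
termination_by ((ids.length : Int) - iter_index).toNat
decreasing_by omega

-- ===== PORT B =====
-- literal transliteration of B: fold of the loop body over range(iter_index, len(ids))
def find_max_ids_index_alt (max_index : Int) (iter_index : Int) (ids : List Int) (ignore_index_list : List Int) : Int :=
  (PySem.List.pyRange iter_index (ids.length : Int) 1).foldl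
    (fun m j =>
      if ((PySem.List.pyGet? ids m).getD 0 ≤ (PySem.List.pyGet? ids j).getD 0
            ∧ ¬ ignore_index_list.contains j)
          ∨ ignore_index_list.contains m
      then j else m) max_index

-- ===== PRECONDITION & SPEC =====
-- Pre_ excludes exactly the inputs where A raises IndexError: an out-of-range iter_index
-- (other than iter_index = len) or an out-of-range initial max_index reached by the first access.
def Pre_find_max_ids_index (max_index : Int) (iter_index : Int) (ids : List Int) (ignore_index_list : List Int) : Prop :=
  iter_index = (ids.length : Int) ∨
    (-(ids.length : Int) ≤ iter_index ∧ iter_index < (ids.length : Int) ∧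
     -(ids.length : Int) ≤ max_index ∧ max_index < (ids.length : Int))
instance (max_index : Int) (iter_index : Int) (ids : List Int) (ignore_index_list : List Int) : Decidable (Pre_find_max_ids_index max_index iter_index ids ignore_index_list) := by unfold Pre_find_max_ids_index; infer_instance
def pvWitness_find_max_ids_index : Int × Int × List Int × List Int := (0, 0, [3, 7, 7, 1], [1])


def Spec_find_max_ids_index (max_index : Int) (iter_index : Int) (ids : List Int) (ignore_index_list : List Int) (out : Int) : Prop := out = find_max_ids_index_alt max_index iter_index ids ignore_index_list
instance (max_index : Int) (iter_index : Int) (ids : List Int) (ignore_index_list : List Int) (out : Int) : Decidable (Spec_find_max_ids_index max_index iter_index ids ignore_index_list out) := by unfold Spec_find_max_ids_index; infer_instance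

-- ===== CLAIM (what is proved, stated in full; the proofs are below) =====
def Claim_equal_find_max_ids_index : Prop := ∀ (max_index : Int) (iter_index : Int) (ids : List Int) (ignore_index_list : List Int), Dom_find_max_ids_index max_index iter_index ids ignore_index_list → Pre_find_max_ids_index max_index iter_index ids ignore_index_list → Spec_find_max_ids_index max_index iter_index ids ignore_index_list (find_max_ids_index max_index iter_index ids ignore_index_list)

-- ===== LEMMAS AND PROOFS =====

-- main lemma: under the in-range invariant the recursion equals the fold, by induction on len - i
theorem find_max_agree (ids ignore_index_list : List Int) :
    ∀ (k : ℕ) (m i : Int), ((ids.length : Int) - i).toNat = k →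
      (i = (ids.length : Int) ∨
        (-(ids.length : Int) ≤ i ∧ i < (ids.length : Int) ∧
         -(ids.length : Int) ≤ m ∧ m < (ids.length : Int))) →
      find_max_ids_index m i ids ignore_index_list =
        find_max_ids_index_alt m i ids ignore_index_list := by
  intro k
  induction k with
  | zero =>
    intro m i hk hpre
    have hi : i = (ids.length : Int) := by
      rcases hpre with h | h
      · exact h
      · omega
    rw [find_max_ids_index, dif_pos hi]
    unfold find_max_ids_index_alt
    rw [hi, PySem.List.pyRange_one_eq_nil (le_refl _)]
    rfl
  | succ k ih =>
    intro m i hk hpre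
    have hi : -(ids.length : Int) ≤ i ∧ i < (ids.length : Int) ∧
        -(ids.length : Int) ≤ m ∧ m < (ids.length : Int) := by
      rcases hpre with h | h
      · omega
      · exact h
    have hne : i ≠ (ids.length : Int) := by omega
    have hm'range : ∀ m' : Int, (m' = i ∨ m' = m) → -(ids.length : Int) ≤ m' ∧ m' < (ids.length : Int) := by
      rintro m' (rfl | rfl) <;> omega
    rw [find_max_ids_index, dif_neg hne, dif_neg (by omega)]
    show find_max_ids_index
        (if ((PySem.List.pyGet? ids m).getD 0 ≤ (PySem.List.pyGet? ids i).getD 0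
              ∧ ¬ ignore_index_list.contains i) ∨ ignore_index_list.contains m
         then i else m) (i + 1) ids ignore_index_list = _
    unfold find_max_ids_index_alt
    rw [PySem.List.pyRange_one_cons (by omega), List.foldl_cons]
    have hrec := ih (if ((PySem.List.pyGet? ids m).getD 0 ≤ (PySem.List.pyGet? ids i).getD 0
              ∧ ¬ ignore_index_list.contains i) ∨ ignore_index_list.contains m
         then i else m) (i + 1) (by omega)
      (by by_cases h : i + 1 = (ids.length : Int)
          · exact Or.inl h
          · refine Or.inr ⟨by omega, by omega, ?_, ?_⟩
            · exact (hm'range _ (by split <;> simp)).1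
            · exact (hm'range _ (by split <;> simp)).2)
    rw [hrec]
    rfl

-- ===== VERDICT (by name: the statement is the Claim_ definition above) =====
theorem find_max_ids_index_spec : Claim_equal_find_max_ids_index := by
  intro m i ids ign _ hpre
  unfold Spec_find_max_ids_index
  exact find_max_agree ids ign _ m i rfl hpre
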